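-- pv_equiv track=rewrite | github.com/natastoyan/GameOfLife | game_of_life_infinite_world.py | crop_dead_cells
-- ===== SOURCE A (Python) =====
-- def crop_dead_cells(cells: list[list[int]]) -> list[list[int]]:
--     i_indexes = []
--     j_indexes = []
--     for i, row in enumerate(cells):
--         for j, cell in enumerate(row):
--             if cell:
--                 j_indexes.append(j)
--                 i_indexes.append(i)
--     max_i = max(i_indexes)
--     min_i = min(i_indexes)
--
--     max_j = max(j_indexes)
--     min_j = min(j_indexes)
--     cells = cells[min_i:max_i+1]
--     for i, row in enumerate(cells):
--         cells[i] = row[min_j:max_j+1]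
--     return cells
-- ===== SOURCE B (Python) =====
-- def crop_dead_cells(cells: list[list[int]]) -> list[list[int]]:
--     # Row span: which rows contain a live cell; column span: which columns do,
--     # tested per column so ragged rows are handled exactly.
--     live_rows = [i for i, row in enumerate(cells) if any(row)]
--     width = max((len(row) for row in cells), default=0)
--     live_cols = [j for j in range(width)
--                  if any(j < len(row) and row[j] for row in cells)]
--     r0, r1 = min(live_rows), max(live_rows)
--     c0, c1 = min(live_cols), max(live_cols)
--     return [row[c0:c1 + 1] for row in cells[r0:r1 + 1]]
-- ===== Notes on version B (the rewrite author's own statement) =====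
-- stated objective: simpler
-- what changed: Replaces the per-cell accumulation of every live cell's (i,j) pair with two presence scans -- a row scan (which rows contain a live cell) and a per-column scan over range(max row length) -- then slices by the spans' min/max; the final in-place row-rewriting loop becomes a single comprehension.
import Mathlib
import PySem

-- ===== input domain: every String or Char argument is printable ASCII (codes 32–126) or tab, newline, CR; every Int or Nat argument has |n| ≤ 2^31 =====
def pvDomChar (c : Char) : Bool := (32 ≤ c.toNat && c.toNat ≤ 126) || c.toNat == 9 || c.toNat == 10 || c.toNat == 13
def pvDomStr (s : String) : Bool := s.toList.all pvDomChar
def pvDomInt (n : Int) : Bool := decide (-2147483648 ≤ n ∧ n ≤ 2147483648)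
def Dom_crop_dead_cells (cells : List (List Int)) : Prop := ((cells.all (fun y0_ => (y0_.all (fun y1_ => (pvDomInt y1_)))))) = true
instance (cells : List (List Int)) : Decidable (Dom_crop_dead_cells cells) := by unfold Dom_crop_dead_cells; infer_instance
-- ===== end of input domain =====

-- B replaces A's per-cell accumulation of live (i,j) pairs by a row-presence scan plus a
-- per-column presence scan, then slices by the spans (objective: simpler).
-- Python A rebinds its local 'cells' only; neither program mutates the caller's list.

-- ===== PORT A =====
-- the two nested 'for' loops building (i_indexes, j_indexes)
def pvCollect (cells : List (List Int)) : List Int × List Int :=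
  (PySem.List.enumerate cells 0).foldl
    (fun acc p =>
      (PySem.List.enumerate p.2 0).foldl
        (fun acc2 q => if q.2 ≠ 0 then (acc2.1 ++ [p.1], acc2.2 ++ [q.1]) else acc2) acc)
    ([], [])

def crop_dead_cells (cells : List (List Int)) : List (List Int) :=
  match PySem.List.max? (pvCollect cells).1 (fun x => x), PySem.List.min? (pvCollect cells).1 (fun x => x),
        PySem.List.max? (pvCollect cells).2 (fun x => x), PySem.List.min? (pvCollect cells).2 (fun x => x) with
  | some maxI, some minI, some maxJ, some minJ =>
      -- cells = cells[min_i:max_i+1]; for i,row: cells[i] = row[min_j:max_j+1]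
      (PySem.List.slice cells (some minI) (some (maxI + 1))).map
        (fun row => PySem.List.slice row (some minJ) (some (maxJ + 1)))
  | _, _, _, _ => []   -- Python raises ValueError (max of empty); outside Pre_

-- ===== PORT B =====
-- live_rows = [i for i, row in enumerate(cells) if any(row)]
def pvLiveRows (cells : List (List Int)) : List Int :=
  ((PySem.List.enumerate cells 0).filter (fun p => p.2.any (fun c => decide (c ≠ 0)))).map (fun p => p.1)

-- width = max((len(row) for row in cells), default=0)
def pvWidth (cells : List (List Int)) : Int :=
  PySem.List.maxD (cells.map (fun r => (r.length : Int))) (fun x => x) 0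

-- live_cols = [j for j in range(width) if any(j < len(row) and row[j] for row in cells)]
def pvLiveCols (cells : List (List Int)) : List Int :=
  (PySem.List.pyRange 0 (pvWidth cells) 1).filter
    (fun j => cells.any (fun row => decide (j < (row.length : Int)) && decide (PySem.List.pyGetD row j 0 ≠ 0)))

def crop_dead_cells_alt (cells : List (List Int)) : List (List Int) :=
  -- r0,r1 / c0,c1 = min/max of the two spans; 'none' = Python's ValueError, outside Pre_
  (((PySem.List.min? (pvLiveRows cells) (fun x => x)).bind (fun r0 =>
    (PySem.List.max? (pvLiveRows cells) (fun x => x)).bind (fun r1 =>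
      (PySem.List.min? (pvLiveCols cells) (fun x => x)).bind (fun c0 =>
        (PySem.List.max? (pvLiveCols cells) (fun x => x)).map (fun c1 =>
          (PySem.List.slice cells (some r0) (some (r1 + 1))).map
            (fun row => PySem.List.slice row (some c0) (some (c1 + 1)))))))).getD [])

-- ===== PRECONDITION & SPEC =====
-- Pre_ excludes exactly the grids with no live (nonzero) cell, on which both Pythons raise ValueError.
def Pre_crop_dead_cells (cells : List (List Int)) : Prop :=
  cells.any (fun row => row.any (fun c => decide (c ≠ 0))) = true
instance (cells : List (List Int)) : Decidable (Pre_crop_dead_cells cells) := by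
  unfold Pre_crop_dead_cells; infer_instance

def pvWitness_crop_dead_cells : List (List Int) := [[0, 1], [0, 0]]

def Spec_crop_dead_cells (cells : List (List Int)) (out : List (List Int)) : Prop := out = crop_dead_cells_alt cells
instance (cells : List (List Int)) (out : List (List Int)) : Decidable (Spec_crop_dead_cells cells out) := by unfold Spec_crop_dead_cells; infer_instance

-- ===== CLAIM (what is proved, stated in full; the proofs are below) =====
def Claim_equal_crop_dead_cells : Prop := ∀ (cells : List (List Int)), Dom_crop_dead_cells cells → Pre_crop_dead_cells cells → Spec_crop_dead_cells cells (crop_dead_cells cells)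

-- ===== LEMMAS AND PROOFS =====

-- spec shape of the lists A accumulates: per row, the live column indices (from t)
def pvLiveJ : List Int → Int → List Int
  | [], _ => []
  | c :: r, t => (if c ≠ 0 then [t] else []) ++ pvLiveJ r (t + 1)

def pvCollI : List (List Int) → Int → List Int
  | [], _ => []
  | r :: rs, s => (pvLiveJ r 0).map (fun _ => s) ++ pvCollI rs (s + 1)

def pvCollJ : List (List Int) → List Int
  | [] => []
  | r :: rs => pvLiveJ r 0 ++ pvCollJ rs

theorem pvInner_eq (row : List Int) (t i : Int) (acc : List Int × List Int) :
    (PySem.List.enumerate row t).foldl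
      (fun acc2 (q : Int × Int) => if q.2 ≠ 0 then (acc2.1 ++ [i], acc2.2 ++ [q.1]) else acc2) acc
    = (acc.1 ++ (pvLiveJ row t).map (fun _ => i), acc.2 ++ pvLiveJ row t) := by
  induction row generalizing t acc with
  | nil => simp [PySem.List.enumerate, pvLiveJ]
  | cons c r ih =>
    rw [PySem.List.enumerate_cons]
    simp only [List.foldl_cons, ih, pvLiveJ]
    by_cases h : c ≠ 0 <;> simp [h]

theorem pvCollect_go (cells : List (List Int)) (s : Int) (acc : List Int × List Int) :
    (PySem.List.enumerate cells s).foldl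
      (fun acc (p : Int × List Int) =>
        (PySem.List.enumerate p.2 0).foldl
          (fun acc2 (q : Int × Int) => if q.2 ≠ 0 then (acc2.1 ++ [p.1], acc2.2 ++ [q.1]) else acc2) acc)
      acc
    = (acc.1 ++ pvCollI cells s, acc.2 ++ pvCollJ cells) := by
  induction cells generalizing s acc with
  | nil => simp [PySem.List.enumerate, pvCollI, pvCollJ]
  | cons r rs ih =>
    rw [PySem.List.enumerate_cons]
    simp only [List.foldl_cons]
    rw [ih]
    simp only [pvInner_eq]
    simp [pvCollI, pvCollJ]

theorem pvCollect_eq (cells : List (List Int)) :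
    pvCollect cells = (pvCollI cells 0, pvCollJ cells) := by
  unfold pvCollect
  have h := pvCollect_go cells 0 ([], [])
  simpa only [List.nil_append] using h

theorem pvLiveJ_ne_nil (row : List Int) (t : Int) :
    pvLiveJ row t ≠ [] ↔ row.any (fun c => decide (c ≠ 0)) = true := by
  induction row generalizing t with
  | nil => simp [pvLiveJ]
  | cons c r ih =>
    by_cases h : c ≠ 0 <;> simp [pvLiveJ, h, ih]

theorem pvMem_collI (cells : List (List Int)) (s x : Int) :
    x ∈ pvCollI cells s ↔ x ∈ ((PySem.List.enumerate cells s).filter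
      (fun p => p.2.any (fun c => decide (c ≠ 0)))).map (fun p => p.1) := by
  induction cells generalizing s with
  | nil => simp [pvCollI, PySem.List.enumerate]
  | cons r rs ih =>
    rw [PySem.List.enumerate_cons]
    by_cases h : r.any (fun c => decide (c ≠ 0)) = true
    · have hne : pvLiveJ r 0 ≠ [] := (pvLiveJ_ne_nil r 0).mpr h
      rw [List.filter_cons_of_pos (by simpa using h)]
      have hmap : x ∈ (pvLiveJ r 0).map (fun _ => s) ↔ x = s := by
        rcases List.exists_mem_of_ne_nil _ hne with ⟨w, hw⟩
        constructor
        · intro hx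
          rcases List.mem_map.mp hx with ⟨a, _, ha⟩
          exact ha.symm
        · rintro rfl
          exact List.mem_map.mpr ⟨w, hw, rfl⟩
      simp only [pvCollI, List.mem_append, hmap, ih, List.map_cons, List.mem_cons]
    · rw [List.filter_cons_of_neg (by simpa using h)]
      have he : pvLiveJ r 0 = [] := by
        by_contra hc; exact h ((pvLiveJ_ne_nil r 0).mp hc)
      simp only [pvCollI, List.mem_append, he, List.map_nil, List.not_mem_nil, false_or, ih]

theorem pvMem_liveJ (row : List Int) (t x : Int) :
    x ∈ pvLiveJ row t ↔ t ≤ x ∧ x - t < (row.length : Int) ∧ row.getD (x - t).toNat 0 ≠ 0 := by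
  induction row generalizing t with
  | nil => simp [pvLiveJ]
  | cons c r ih =>
    simp only [pvLiveJ, List.mem_append, ih]
    by_cases h : c = 0
    · simp only [h, ne_eq, not_true_eq_false, if_false, List.not_mem_nil, false_or]
      constructor
      · rintro ⟨h1, h2, h3⟩
        refine ⟨by omega, by simp only [List.length_cons]; push_cast; omega, ?_⟩
        rw [show (x - t).toNat = (x - (t + 1)).toNat + 1 from by omega, List.getD_cons_succ]
        exact h3
      · rintro ⟨h1, h2, h3⟩
        have hxt : x ≠ t := by
          rintro rfl
          rw [show (x - x).toNat = 0 from by omega, List.getD_cons_zero] at h3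
          exact h3 rfl
        refine ⟨by omega, by simp only [List.length_cons] at h2 ⊢; push_cast at h2 ⊢; omega, ?_⟩
        rw [show (x - t).toNat = (x - (t + 1)).toNat + 1 from by omega, List.getD_cons_succ] at h3
        exact h3
    · simp only [h, ne_eq, not_false_eq_true, if_true, List.mem_singleton]
      constructor
      · rintro (rfl | ⟨h1, h2, h3⟩)
        · refine ⟨le_refl _, by simp only [List.length_cons]; push_cast; omega, ?_⟩
          rw [show (x - x).toNat = 0 from by omega, List.getD_cons_zero]
          exact h
        · refine ⟨by omega, by simp only [List.length_cons] at h2 ⊢; push_cast at h2 ⊢; omega, ?_⟩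
          rw [show (x - t).toNat = (x - (t + 1)).toNat + 1 from by omega, List.getD_cons_succ]
          exact h3
      · rintro ⟨h1, h2, h3⟩
        by_cases hxt : x = t
        · exact Or.inl hxt
        · refine Or.inr ⟨by omega, by simp only [List.length_cons] at h2 ⊢; push_cast at h2 ⊢; omega, ?_⟩
          rw [show (x - t).toNat = (x - (t + 1)).toNat + 1 from by omega, List.getD_cons_succ] at h3
          exact h3

theorem pvMem_collJ (cells : List (List Int)) (x : Int) :
    x ∈ pvCollJ cells ↔ ∃ row ∈ cells, x ∈ pvLiveJ row 0 := by
  induction cells with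
  | nil => simp [pvCollJ]
  | cons r rs ih => simp [pvCollJ, ih]

theorem pvLen_le_width (cells : List (List Int)) (row : List Int) (h : row ∈ cells) :
    (row.length : Int) ≤ pvWidth cells := by
  unfold pvWidth PySem.List.maxD
  cases hm : PySem.List.max? (cells.map (fun r => (r.length : Int))) (fun x => x) with
  | none =>
    exfalso
    have := (PySem.List.max?_eq_none_iff _ _).mp hm
    simp at this
    rw [this] at h; simp at h
  | some m =>
    have := PySem.List.max?_isMax hm ((row.length : Int)) (by simp; exact ⟨row, h, rfl⟩)
    simpa using this

theorem pvMem_cols (cells : List (List Int)) (x : Int) :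
    x ∈ pvCollJ cells ↔ x ∈ pvLiveCols cells := by
  rw [pvMem_collJ]
  unfold pvLiveCols
  simp only [List.mem_filter, PySem.List.mem_pyRange_one, List.any_eq_true, Bool.and_eq_true,
    decide_eq_true_eq]
  constructor
  · rintro ⟨row, hrow, hx⟩
    rcases (pvMem_liveJ row 0 x).mp hx with ⟨h1, h2, h3⟩
    simp only [Int.sub_zero] at h2 h3
    have hw := pvLen_le_width cells row hrow
    refine ⟨⟨h1, by omega⟩, row, hrow, h2, ?_⟩
    rw [PySem.List.pyGetD_eq_getElem row 0 h1 h2]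
    rwa [List.getD_eq_getElem row 0 (by omega)] at h3
  · rintro ⟨⟨h0, _⟩, row, hrow, h2, h3⟩
    refine ⟨row, hrow, (pvMem_liveJ row 0 x).mpr ⟨h0, by simpa using h2, ?_⟩⟩
    simp only [Int.sub_zero]
    rw [List.getD_eq_getElem row 0 (by omega)]
    rwa [PySem.List.pyGetD_eq_getElem row 0 h0 h2] at h3

theorem pvMin_id_congr (l l' : List Int) (h : ∀ x, x ∈ l ↔ x ∈ l') :
    PySem.List.min? l (fun x => x) = PySem.List.min? l' (fun x => x) := by
  cases hl : PySem.List.min? l (fun x => x) with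
  | none =>
    cases hl' : PySem.List.min? l' (fun x => x) with
    | none => rfl
    | some m =>
      have hm := PySem.List.min?_mem hl'
      have he : l = [] := (PySem.List.min?_eq_none_iff _ _).mp hl
      rw [he] at h
      exact absurd ((h m).mpr hm) (by simp)
  | some m =>
    cases hl' : PySem.List.min? l' (fun x => x) with
    | none =>
      have hm := PySem.List.min?_mem hl
      have he : l' = [] := (PySem.List.min?_eq_none_iff _ _).mp hl'
      rw [he] at h
      exact absurd ((h m).mp hm) (by simp)
    | some m' =>
      have h1 := PySem.List.min?_isMin hl m' ((h m').mpr (PySem.List.min?_mem hl'))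
      have h2 := PySem.List.min?_isMin hl' m ((h m).mp (PySem.List.min?_mem hl))
      simp only [Option.some.injEq]
      exact le_antisymm h1 h2

theorem pvMax_id_congr (l l' : List Int) (h : ∀ x, x ∈ l ↔ x ∈ l') :
    PySem.List.max? l (fun x => x) = PySem.List.max? l' (fun x => x) := by
  cases hl : PySem.List.max? l (fun x => x) with
  | none =>
    cases hl' : PySem.List.max? l' (fun x => x) with
    | none => rfl
    | some m =>
      have hm := PySem.List.max?_mem hl'
      have he : l = [] := (PySem.List.max?_eq_none_iff _ _).mp hl
      rw [he] at h
      exact absurd ((h m).mpr hm) (by simp)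
  | some m =>
    cases hl' : PySem.List.max? l' (fun x => x) with
    | none =>
      have hm := PySem.List.max?_mem hl
      have he : l' = [] := (PySem.List.max?_eq_none_iff _ _).mp hl'
      rw [he] at h
      exact absurd ((h m).mp hm) (by simp)
    | some m' =>
      have h1 := PySem.List.max?_isMax hl m' ((h m').mpr (PySem.List.max?_mem hl'))
      have h2 := PySem.List.max?_isMax hl' m ((h m).mp (PySem.List.max?_mem hl))
      simp only [Option.some.injEq]
      exact le_antisymm h2 h1

theorem pvRows_iff (cells : List (List Int)) (x : Int) :
    x ∈ (pvCollect cells).1 ↔ x ∈ pvLiveRows cells := by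
  rw [pvCollect_eq]
  exact pvMem_collI cells 0 x

theorem pvCols_iff (cells : List (List Int)) (x : Int) :
    x ∈ (pvCollect cells).2 ↔ x ∈ pvLiveCols cells := by
  rw [pvCollect_eq]
  exact pvMem_cols cells x

theorem pvEqual (cells : List (List Int)) :
    crop_dead_cells cells = crop_dead_cells_alt cells := by
  unfold crop_dead_cells crop_dead_cells_alt
  rw [pvMax_id_congr _ _ (pvRows_iff cells), pvMin_id_congr _ _ (pvRows_iff cells),
      pvMax_id_congr _ _ (pvCols_iff cells), pvMin_id_congr _ _ (pvCols_iff cells)]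
  cases PySem.List.min? (pvLiveRows cells) (fun x => x) <;>
    cases PySem.List.max? (pvLiveRows cells) (fun x => x) <;>
    cases PySem.List.min? (pvLiveCols cells) (fun x => x) <;>
    cases PySem.List.max? (pvLiveCols cells) (fun x => x) <;> rfl

-- ===== VERDICT (by name: the statement is the Claim_ definition above) =====
theorem crop_dead_cells_spec : Claim_equal_crop_dead_cells := by
  intro cells _ _
  unfold Spec_crop_dead_cells
  exact pvEqual cells
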